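-- pv_equiv track=rewrite | github.com/gakukuriu/CtCI | ch01/python3/problem1.5.py | conversionCheckSub
-- ===== SOURCE A (Python) =====
-- def conversionCheckSub(s1, s2):
--   if len(s1) != len(s2):
--     return False
--   else:
--     test = s2
--     for c in s1:
--       test = test.replace(c, '', 1)
--     return len(test) == 1
-- ===== SOURCE B (Python) =====
-- def conversionCheckSub(s1, s2):
--     if len(s1) != len(s2):
--         return False
--     leftover = 0
--     for c in set(s2):
--         leftover += max(s2.count(c) - s1.count(c), 0)
--     return leftover == 1
-- ===== Notes on version B (the rewrite author's own statement) =====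
-- stated objective: faster
-- what changed: B replaces A's sequential destructive replace-loop (n string rebuilds) by a closed-form count: sum over the distinct characters of s2 of max(s2.count(c)-s1.count(c),0), using C-level str.count scans instead of per-character string copies.
import Mathlib
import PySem

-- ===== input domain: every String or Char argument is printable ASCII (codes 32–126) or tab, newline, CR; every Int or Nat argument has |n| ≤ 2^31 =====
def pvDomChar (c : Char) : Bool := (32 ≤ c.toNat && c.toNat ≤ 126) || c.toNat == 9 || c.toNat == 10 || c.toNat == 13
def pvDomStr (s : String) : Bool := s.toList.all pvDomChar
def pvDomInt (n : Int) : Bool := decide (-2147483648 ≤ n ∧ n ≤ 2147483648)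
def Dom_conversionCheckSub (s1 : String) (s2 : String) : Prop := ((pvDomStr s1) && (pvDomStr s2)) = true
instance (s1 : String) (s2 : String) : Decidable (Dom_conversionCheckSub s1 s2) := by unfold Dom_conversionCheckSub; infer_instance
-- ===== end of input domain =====

-- B replaces A's sequential replace-loop by a per-distinct-character count difference sum; proved equal on all inputs.

-- ===== PORT A =====
-- test.replace(c, '', 1): old is the single char c, new is '', count = 1 —
-- hand port (exact for a single-char pattern): drop the first occurrence of c.
def pvEraseFirst : List Char → Char → List Char
  | [], _ => []
  | x :: xs, c => if x == c then xs else x :: pvEraseFirst xs c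

def conversionCheckSub (s1 : String) (s2 : String) : Bool :=
  if s1.toList.length ≠ s2.toList.length then
    false
  else
    -- test = s2; for c in s1: test = test.replace(c, '', 1); return len(test) == 1
    decide ((s1.toList.foldl pvEraseFirst s2.toList).length = 1)

-- ===== PORT B =====
-- s.count(c) for a single char c is exactly the char count of the string (ported as List.count).
def conversionCheckSub_alt (s1 : String) (s2 : String) : Bool :=
  if s1.toList.length ≠ s2.toList.length then
    false
  else
    -- leftover = 0; for c in set(s2): leftover += max(s2.count(c) - s1.count(c), 0)
    let leftover : Int :=
      (PySem.Set.ofList s2.toList).foldl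
        (fun acc c => acc + max ((s2.toList.count c : Int) - (s1.toList.count c : Int)) 0) 0
    decide (leftover = 1)

-- ===== PRECONDITION & SPEC =====
def Spec_conversionCheckSub (s1 : String) (s2 : String) (out : Bool) : Prop := out = conversionCheckSub_alt s1 s2
instance (s1 : String) (s2 : String) (out : Bool) : Decidable (Spec_conversionCheckSub s1 s2 out) := by unfold Spec_conversionCheckSub; infer_instance

-- ===== CLAIM (what is proved, stated in full; the proofs are below) =====
def Claim_equal_conversionCheckSub : Prop := ∀ (s1 : String) (s2 : String), Dom_conversionCheckSub s1 s2 → Spec_conversionCheckSub s1 s2 (conversionCheckSub s1 s2)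

-- ===== LEMMAS AND PROOFS =====

theorem pvEraseFirst_eq_erase (l : List Char) (c : Char) : pvEraseFirst l c = l.erase c := by
  induction l with
  | nil => rfl
  | cons x xs ih => simp [pvEraseFirst, List.erase_cons, ih]

theorem count_foldl_eraseFirst (s1 s2 : List Char) (c : Char) :
    (s1.foldl pvEraseFirst s2).count c = s2.count c - s1.count c := by
  induction s1 generalizing s2 with
  | nil => simp
  | cons a rest ih =>
      simp only [List.foldl_cons, ih, pvEraseFirst_eq_erase, List.count_erase,
        List.count_cons]
      by_cases h : c = a <;> simp [h] <;> omega

theorem foldl_eraseFirst_sublist (s1 s2 : List Char) :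
    (s1.foldl pvEraseFirst s2).Sublist s2 := by
  induction s1 generalizing s2 with
  | nil => simp
  | cons a rest ih =>
      exact (ih (pvEraseFirst s2 a)).trans (by rw [pvEraseFirst_eq_erase]; exact List.erase_sublist)

theorem sum_indicator_one (x : Char) (L : List Char) (hnd : L.Nodup) (hx : x ∈ L) :
    (L.map (fun c => if c = x then (1 : Int) else 0)).sum = 1 := by
  induction L with
  | nil => simp at hx
  | cons y ys ihL =>
      simp only [List.nodup_cons] at hnd
      rcases List.mem_cons.mp hx with h | h
      · subst h
        have hz : (ys.map (fun c => if c = x then (1 : Int) else 0)).sum = 0 := by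
          apply List.sum_eq_zero
          intro z hz
          rcases List.mem_map.mp hz with ⟨c, hc, rfl⟩
          have : c ≠ x := fun hcy => hnd.1 (hcy ▸ hc)
          simp [this]
        simp [hz]
      · have hyx : y ≠ x := fun hyx => hnd.1 (hyx ▸ h)
        simp only [List.map_cons, List.sum_cons, if_neg hyx]
        rw [ihL hnd.2 h]
        ring

theorem sum_counts_eq_length (t L : List Char) (hnd : L.Nodup)
    (hsub : ∀ a ∈ t, a ∈ L) :
    (L.map (fun c => ((t.count c : Int)))).sum = (t.length : Int) := by
  induction t with
  | nil => simp
  | cons x t' ih =>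
      have hx : x ∈ L := hsub x (by simp)
      have ih' := ih (fun a ha => hsub a (by simp [ha]))
      have hsplit : (L.map (fun c => ((x :: t').count c : Int))).sum
          = (L.map (fun c => ((t'.count c : Int)))).sum
            + (L.map (fun c => if c = x then (1 : Int) else 0)).sum := by
        rw [← List.sum_map_add]
        congr 1
        apply List.map_congr_left
        intro c _
        by_cases h : c = x
        · simp [h]
        · have hne : x ≠ c := fun hxc => h (Eq.symm hxc)
          simp [h, hne]
      rw [hsplit, ih', sum_indicator_one x L hnd hx]
      simp [List.length_cons]

theorem foldl_add_max_eq_sum (L : List Char) (f : Char → Int) (a : Int) :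
    L.foldl (fun acc c => acc + f c) a = a + (L.map f).sum := by
  induction L generalizing a with
  | nil => simp
  | cons x xs ih => simp [List.foldl_cons, ih, add_assoc]

theorem cast_sub_eq_max (a b : Nat) : ((a - b : Nat) : Int) = max ((a : Int) - b) 0 := by
  omega

-- ===== VERDICT (by name: the statement is the Claim_ definition above) =====
theorem conversionCheckSub_spec : Claim_equal_conversionCheckSub := by
  intro s1 s2 _
  unfold Spec_conversionCheckSub conversionCheckSub conversionCheckSub_alt
  by_cases hlen : s1.toList.length ≠ s2.toList.length
  · rw [if_pos hlen, if_pos hlen]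
  · rw [if_neg hlen, if_neg hlen]
    set t := s1.toList.foldl pvEraseFirst s2.toList with ht
    set L := PySem.Set.ofList s2.toList with hL
    have hnd : L.Nodup := PySem.Set.nodup_ofList s2.toList
    have hsub : ∀ a ∈ t, a ∈ L := by
      intro a ha
      have : a ∈ s2.toList := (foldl_eraseFirst_sublist s1.toList s2.toList).mem ha
      rw [hL]
      exact (PySem.Set.mem_ofList _ _).mpr this
    have hcnt : ∀ c, (t.count c : Int) = max ((s2.toList.count c : Int) - (s1.toList.count c : Int)) 0 := by
      intro c
      rw [ht, count_foldl_eraseFirst, cast_sub_eq_max]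
    have hsum : (L.foldl (fun acc c => acc + max ((s2.toList.count c : Int) - (s1.toList.count c : Int)) 0) 0)
        = (t.length : Int) := by
      rw [foldl_add_max_eq_sum, zero_add]
      have hmap : L.map (fun c => max ((s2.toList.count c : Int) - (s1.toList.count c : Int)) 0)
          = L.map (fun c => ((t.count c : Int))) := by
        apply List.map_congr_left
        intro c _
        rw [hcnt c]
      rw [hmap, sum_counts_eq_length t L hnd hsub]
    rw [hsum]
    simp only [decide_eq_decide]
    exact_mod_cast Iff.rfl
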